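-- pv_equiv track=rewrite | github.com/EricPaesBarreto/prg-basics | PrepForTest3/Mock1/py7.py | f
-- ===== SOURCE A (Python) =====
-- def f(matrix):
--     collumn_sum = [0 for i in range(len(matrix[0]))]
--
--     # count sums
--     for i_hat in range(len(matrix)):
--         # row
--         for j_hat in range(len(matrix[0])): # assume all rows are same length
--             # column
--             collumn_sum[j_hat] += matrix[i_hat][j_hat]
--
--     # are at least two sums identical
--     for index in range(len(collumn_sum)):
--         for index_2 in range(len(collumn_sum)):
--             if index == index_2: continue
--             if collumn_sum[index] == collumn_sum[index_2]: return True
--     return False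
-- ===== SOURCE B (Python) =====
-- def f(matrix):
--     k = len(matrix[0])
--     sums = sorted(sum(row[j] for row in matrix) for j in range(k))
--     return any(sums[t] == sums[t + 1] for t in range(len(sums) - 1))
-- ===== Notes on version B (the rewrite author's own statement) =====
-- stated objective: alternative
-- what changed: B computes the column sums in one column-major comprehension and replaces A's all-pairs duplicate scan with sorting the sums and a single adjacent-pair pass.
import Mathlib
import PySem

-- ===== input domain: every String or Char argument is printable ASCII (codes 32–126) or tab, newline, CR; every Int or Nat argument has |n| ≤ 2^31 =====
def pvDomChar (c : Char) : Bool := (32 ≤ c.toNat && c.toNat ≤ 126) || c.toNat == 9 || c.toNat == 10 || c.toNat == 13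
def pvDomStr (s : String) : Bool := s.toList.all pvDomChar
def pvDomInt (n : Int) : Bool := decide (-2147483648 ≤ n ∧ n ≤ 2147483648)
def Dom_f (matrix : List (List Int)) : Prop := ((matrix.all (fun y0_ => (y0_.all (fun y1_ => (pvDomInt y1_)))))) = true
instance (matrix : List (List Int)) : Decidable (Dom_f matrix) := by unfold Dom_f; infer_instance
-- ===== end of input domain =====

-- B replaces A's all-pairs duplicate scan over the column sums with sort + one adjacent-pair pass (alternative algorithm; not measurably faster on the timed inputs).

-- ===== PORT A =====
-- literal transliteration of A; on inputs where Python A raises IndexError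
-- (empty matrix, or a row shorter than row 0) Pre_f excludes the input.
def f (matrix : List (List Int)) : Bool :=
  let k := (matrix.headD []).length
  let collumnSum :=
    (List.range matrix.length).foldl
      (fun acc i =>
        (List.range k).foldl
          (fun a j => a.set j (a.getD j 0 + ((matrix.getD i []).getD j 0)))
          acc)
      (List.replicate k (0 : Int))
  (List.range collumnSum.length).any (fun index =>
    (List.range collumnSum.length).any (fun index2 =>
      if index = index2 then false
      else collumnSum.getD index 0 == collumnSum.getD index2 0))

-- ===== PORT B =====
def f_alt (matrix : List (List Int)) : Bool :=
  let k := (matrix.headD []).length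
  let sums := PySem.List.sorted
      ((List.range k).map (fun j => (matrix.map (fun row => row.getD j 0)).sum))
      (fun x => x) false
  (List.range (sums.length - 1)).any (fun t => sums.getD t 0 == sums.getD (t + 1) 0)

-- ===== PRECONDITION & SPEC =====
-- Pre_f excludes exactly the inputs where Python A raises IndexError:
-- the empty matrix (matrix[0]) and ragged matrices with a row shorter than row 0.
def Pre_f (matrix : List (List Int)) : Prop :=
  matrix ≠ [] ∧ ∀ row ∈ matrix, (matrix.headD []).length ≤ row.length
instance (matrix : List (List Int)) : Decidable (Pre_f matrix) := by unfold Pre_f; infer_instance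
def pvWitness_f : List (List Int) := [[1, 2], [3, 4]]

def Spec_f (matrix : List (List Int)) (out : Bool) : Prop := out = f_alt matrix
instance (matrix : List (List Int)) (out : Bool) : Decidable (Spec_f matrix out) := by unfold Spec_f; infer_instance

-- ===== CLAIM (what is proved, stated in full; the proofs are below) =====
def Claim_equal_f : Prop := ∀ (matrix : List (List Int)), Dom_f matrix → Pre_f matrix → Spec_f matrix (f matrix)

-- ===== LEMMAS AND PROOFS =====

-- folding over range-with-getD is folding over the list itself
theorem foldl_range_getD {α β : Type} (g : β → α → β) (d : α) :
    ∀ (xs : List α) (init : β),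
      (List.range xs.length).foldl (fun acc i => g acc (xs.getD i d)) init = xs.foldl g init := by
  intro xs
  induction xs with
  | nil => intro init; simp
  | cons x xs ih =>
    intro init
    simp only [List.length_cons, List.range_succ_eq_map, List.foldl_cons, List.foldl_map,
      List.getD_cons_zero, List.getD_cons_succ]
    exact ih (g init x)

-- the inner loop preserves length
theorem inner_length (row : List Int) :
    ∀ (k : Nat) (acc : List Int),
      ((List.range k).foldl (fun a t => a.set t (a.getD t 0 + row.getD t 0)) acc).length
        = acc.length := by
  intro k
  induction k with
  | zero => intro acc; simp
  | succ k ih =>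
    intro acc
    rw [List.range_succ, List.foldl_append]
    simp only [List.foldl_cons, List.foldl_nil, List.length_set]
    exact ih acc

-- the inner loop does not touch indices ≥ k
theorem inner_getD_ge (row : List Int) :
    ∀ (k : Nat) (acc : List Int) (j : Nat), k ≤ j →
      ((List.range k).foldl (fun a t => a.set t (a.getD t 0 + row.getD t 0)) acc).getD j 0
        = acc.getD j 0 := by
  intro k
  induction k with
  | zero => intro acc j _; simp
  | succ k ih =>
    intro acc j hj
    rw [List.range_succ, List.foldl_append]
    simp only [List.foldl_cons, List.foldl_nil]
    have hne : k ≠ j := by omega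
    rw [List.getD, List.getElem?_set_ne hne, ← List.getD, ih acc j (by omega)]

-- the inner loop adds row's entry at every index < k
theorem inner_getD (row : List Int) :
    ∀ (k : Nat) (acc : List Int) (j : Nat), j < k → k ≤ acc.length →
      ((List.range k).foldl (fun a t => a.set t (a.getD t 0 + row.getD t 0)) acc).getD j 0
        = acc.getD j 0 + row.getD j 0 := by
  intro k
  induction k with
  | zero => intro acc j hj _; omega
  | succ k ih =>
    intro acc j hj hk
    rw [List.range_succ, List.foldl_append]
    simp only [List.foldl_cons, List.foldl_nil]
    by_cases hjk : j < k
    · have hne : k ≠ j := by omega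
      rw [List.getD, List.getElem?_set_ne hne, ← List.getD, ih acc j hjk (by omega)]
    · have hjek : j = k := by omega
      subst hjek
      have hlen : j < ((List.range j).foldl
          (fun a t => a.set t (a.getD t 0 + row.getD t 0)) acc).length := by
        rw [inner_length]; omega
      rw [List.getD, List.getElem?_set_self hlen]
      simp only [Option.getD_some]
      rw [inner_getD_ge row j acc j (le_refl j)]

-- column sum of a list of rows
def colsum (ms : List (List Int)) (j : Nat) : Int := (ms.map (fun row => row.getD j 0)).sum

theorem outer_length (k : Nat) :
    ∀ (ms : List (List Int)) (acc : List Int),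
      (ms.foldl (fun acc row =>
          (List.range k).foldl (fun a t => a.set t (a.getD t 0 + row.getD t 0)) acc) acc).length
        = acc.length := by
  intro ms
  induction ms with
  | nil => intro acc; simp
  | cons r ms ih => intro acc; simp only [List.foldl_cons]; rw [ih, inner_length]

theorem outer_getD (k : Nat) :
    ∀ (ms : List (List Int)) (acc : List Int), acc.length = k → ∀ j : Nat, j < k →
      (ms.foldl (fun acc row =>
          (List.range k).foldl (fun a t => a.set t (a.getD t 0 + row.getD t 0)) acc) acc).getD j 0
        = acc.getD j 0 + colsum ms j := by
  intro ms
  induction ms with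
  | nil => intro acc _ j _; simp [colsum]
  | cons r ms ih =>
    intro acc hlen j hj
    simp only [List.foldl_cons]
    rw [ih _ (by rw [inner_length]; exact hlen) j hj, inner_getD r k acc j hj (by omega)]
    simp [colsum]
    ring

-- A's column sums equal B's column-major map
theorem sums_eq (matrix : List (List Int)) :
    (List.range matrix.length).foldl
      (fun acc i =>
        (List.range (matrix.headD []).length).foldl
          (fun a j => a.set j (a.getD j 0 + ((matrix.getD i []).getD j 0)))
          acc)
      (List.replicate (matrix.headD []).length (0 : Int))
    = (List.range (matrix.headD []).length).map (fun j => colsum matrix j) := by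
  set k := (matrix.headD []).length with hk
  rw [foldl_range_getD
    (fun acc row => (List.range k).foldl (fun a j => a.set j (a.getD j 0 + row.getD j 0)) acc)
    ([] : List Int) matrix (List.replicate k (0 : Int))]
  apply List.ext_getElem
  · rw [outer_length]; simp
  · intro j h1 h2
    have hj : j < k := by simpa using h2
    have hres := outer_getD k matrix (List.replicate k (0 : Int)) (by simp) j hj
    rw [← List.getD_eq_getElem _ 0 h1, ← List.getD_eq_getElem _ 0 h2, hres]
    simp [hj]

-- A's all-pairs scan detects exactly a duplicate
theorem scanA_iff (xs : List Int) :
    ((List.range xs.length).any (fun i =>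
      (List.range xs.length).any (fun j =>
        if i = j then false else xs.getD i 0 == xs.getD j 0)) = true)
    ↔ ¬ xs.Nodup := by
  rw [List.Nodup, List.pairwise_iff_getElem]
  push Not
  simp only [List.any_eq_true, List.mem_range]
  constructor
  · rintro ⟨i, hi, j, hj, hij⟩
    by_cases h : i = j
    · simp [h] at hij
    · rw [if_neg h] at hij
      rw [List.getD_eq_getElem _ 0 hi, List.getD_eq_getElem _ 0 hj, beq_iff_eq] at hij
      rcases Nat.lt_or_ge i j with hlt | hge
      · exact ⟨i, j, hi, hj, hlt, by simpa using hij⟩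
      · have : j < i := by omega
        exact ⟨j, i, hj, hi, this, by simp [hij]⟩
  · rintro ⟨i, j, hi, hj, hlt, heq⟩
    refine ⟨i, hi, j, hj, ?_⟩
    rw [if_neg (by omega)]
    rw [List.getD_eq_getElem _ 0 hi, List.getD_eq_getElem _ 0 hj, beq_iff_eq]
    simpa using heq

-- on a ≤-sorted list, an adjacent equal pair exists iff there is any duplicate
theorem adj_iff (ys : List Int) (hs : ys.Pairwise (· ≤ ·)) :
    ((List.range (ys.length - 1)).any
        (fun t => ys.getD t 0 == ys.getD (t + 1) 0) = true)
    ↔ ¬ ys.Nodup := by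
  rw [List.Nodup, List.pairwise_iff_getElem]
  push Not
  rw [List.pairwise_iff_getElem] at hs
  simp only [List.any_eq_true, List.mem_range]
  constructor
  · rintro ⟨t, ht, heq⟩
    have h1 : t < ys.length := by omega
    have h2 : t + 1 < ys.length := by omega
    rw [List.getD_eq_getElem _ 0 h1, List.getD_eq_getElem _ 0 h2, beq_iff_eq] at heq
    exact ⟨t, t + 1, h1, h2, by omega, by simpa using heq⟩
  · rintro ⟨i, j, hi, hj, hlt, heq⟩
    refine ⟨i, by omega, ?_⟩
    have hi1 : i + 1 < ys.length := by omega
    have hle1 : ys[i] ≤ ys[i + 1] := hs i (i + 1) hi hi1 (by omega)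
    have hle2 : ys[i + 1] ≤ ys[j] := by
      rcases Nat.lt_or_ge (i + 1) j with h | h
      · exact hs (i + 1) j hi1 hj h
      · have : i + 1 = j := by omega
        simp [this]
    have : ys[i] = ys[i + 1] := le_antisymm hle1 (heq ▸ hle2)
    rw [List.getD_eq_getElem _ 0 hi, List.getD_eq_getElem _ 0 hi1, beq_iff_eq]
    simpa using this

-- the two ports agree on every input (the Pre_ is only needed for faithfulness to Python)
theorem f_eq_f_alt (matrix : List (List Int)) : f matrix = f_alt matrix := by
  simp only [f, f_alt]
  have hsums := sums_eq matrix
  simp only [colsum] at hsums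
  rw [hsums]
  set S := (List.range (matrix.headD []).length).map
      (fun j => (matrix.map (fun row => row.getD j 0)).sum) with hS
  have hbool : ∀ a b : Bool, ((a = true) ↔ (b = true)) → a = b := by decide
  apply hbool
  rw [scanA_iff S,
    adj_iff (PySem.List.sorted S (fun x => x) false)
      (PySem.List.sorted_pairwise S (fun x => x)),
    List.Perm.nodup_iff (PySem.List.sorted_perm S (fun x => x) false)]

-- ===== VERDICT (by name: the statement is the Claim_ definition above) =====
theorem f_spec : Claim_equal_f := by
  intro matrix _ _
  unfold Spec_f
  exact f_eq_f_alt matrix
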